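-- pv_equiv track=rewrite | github.com/Riverfount/estudos | strings/criptografia.py | criptografia
-- ===== SOURCE A (Python) =====
-- def criptografia(text):
--     aux_list = []
--     for c in text:
--         if c.isalpha():
--             aux_list.append(chr(ord(c) + 3))
--         else:
--             aux_list.append(c)
--     aux_str = ''.join(aux_list)[::-1]
--     aux_list = []
--     for i, c in enumerate(aux_str):
--         if i >= (len(aux_str) // 2):
--             aux_list.append(chr(ord(c) - 1))
--         else:
--             aux_list.append(c)
--     return ''.join(aux_list)
-- ===== SOURCE B (Python) =====
-- def criptografia(text):
--     # Precomputed substitution tables over the ASCII range: one for the chars that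
--     # end up in the back (shift-only) half, one for those that also get the -1.
--     shift = {}
--     shift_dec = {}
--     for i in range(1, 128):
--         c = chr(i)
--         d = 3 if c.isalpha() else 0
--         shift[c] = chr(i + d)
--         shift_dec[c] = chr(i + d - 1)
--     n = len(text)
--     k = n - n // 2  # source chars before position k land in the decremented output half
--     back = ''.join(shift[c] for c in text[k:])
--     front = ''.join(shift_dec[c] for c in text[:k])
--     return back[::-1] + front[::-1]
-- ===== Notes on version B (the rewrite author's own statement) =====
-- stated objective: faster
-- what changed: B is a substitution-table cipher: it precomputes two ASCII lookup tables (shift-by-3-for-letters, and the same with an extra -1), splits the source at k = n - n//2, translates each half through its table, and returns the reversed concatenation; A instead computes per-character ord/chr arithmetic in two sequential passes (shift pass, then join/reverse and an enumerate pass decrementing the second half).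
import Mathlib
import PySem

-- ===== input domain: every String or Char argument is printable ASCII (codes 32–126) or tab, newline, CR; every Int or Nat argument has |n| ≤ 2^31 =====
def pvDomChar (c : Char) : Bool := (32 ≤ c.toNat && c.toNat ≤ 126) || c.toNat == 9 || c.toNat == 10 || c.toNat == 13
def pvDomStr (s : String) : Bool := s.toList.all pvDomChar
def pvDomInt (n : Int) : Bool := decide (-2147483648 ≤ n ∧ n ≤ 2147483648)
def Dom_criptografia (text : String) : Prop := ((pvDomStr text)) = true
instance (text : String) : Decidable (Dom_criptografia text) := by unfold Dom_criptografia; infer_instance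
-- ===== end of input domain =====

-- B: precomputed ASCII substitution tables applied to the two source halves, instead of A's
-- per-character arithmetic in sequential shift / reverse / decrement passes.

-- ===== PORT A =====
-- ''.join(list)[::-1] is List.reverse (PySem.List.slice?_none_none_neg_one); enumerate → PySem.List.enumerate.
def criptografia (text : String) : String :=
  let auxStr : List Char :=
    (text.toList.foldl (fun acc c =>
      if PySem.Chars.isalpha c then acc ++ [Char.ofNat (c.toNat + 3)] else acc ++ [c]) []).reverse
  String.ofList ((PySem.List.enumerate auxStr 0).foldl (fun acc p =>
    if p.1 ≥ PySem.Int.floordiv (auxStr.length : Int) 2 then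
      acc ++ [Char.ofNat (p.2.toNat - 1)]
    else acc ++ [p.2]) [])

-- ===== PORT B =====
-- The two translation tables Source B builds with 'for i in range(1, 128)' (chr(i) → Char.ofNat).
def pvTables : PySem.Dict Char Char × PySem.Dict Char Char :=
  (PySem.List.pyRange 1 128 1).foldl (fun ds i =>
    let c := Char.ofNat i.toNat
    let d : Int := if PySem.Chars.isalpha c then 3 else 0
    (ds.1.insert c (Char.ofNat (i + d).toNat), ds.2.insert c (Char.ofNat (i + d - 1).toNat)))
    (PySem.Dict.empty, PySem.Dict.empty)

-- shift[c] (plain dict indexing) ported as getD c c: every char admitted by Dom_ is a table key,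
-- so the default is never reached there; string slices text[k:], text[:k] → PySem.List.slice.
def criptografia_alt (text : String) : String :=
  let tbls := pvTables
  let s := text.toList
  let n : Int := s.length
  let k : Int := n - PySem.Int.floordiv n 2
  let back := (PySem.List.slice s (some k) none).map (fun c => tbls.1.getD c c)
  let front := (PySem.List.slice s none (some k)).map (fun c => tbls.2.getD c c)
  String.ofList (back.reverse ++ front.reverse)

-- ===== PRECONDITION & SPEC =====
def Spec_criptografia (text : String) (out : String) : Prop := out = criptografia_alt text
instance (text : String) (out : String) : Decidable (Spec_criptografia text out) := by unfold Spec_criptografia; infer_instance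

-- ===== CLAIM (what is proved, stated in full; the proofs are below) =====
def Claim_equal_criptografia : Prop := ∀ (text : String), Dom_criptografia text → Spec_criptografia text (criptografia text)

-- ===== LEMMAS AND PROOFS =====

-- A's first loop is a map (shift alphabetic chars by +3).
lemma pvFold1 (xs : List Char) :
    xs.foldl (fun acc c =>
      if PySem.Chars.isalpha c then acc ++ [Char.ofNat (c.toNat + 3)] else acc ++ [c]) []
    = xs.map (fun c => if PySem.Chars.isalpha c then Char.ofNat (c.toNat + 3) else c) := by
  have h : (fun (acc : List Char) c =>
      if PySem.Chars.isalpha c then acc ++ [Char.ofNat (c.toNat + 3)] else acc ++ [c])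
      = fun acc c => acc ++ [if PySem.Chars.isalpha c then Char.ofNat (c.toNat + 3) else c] := by
    funext acc c; split <;> rfl
  rw [h, PySem.List.foldl_append_singleton_eq_map]; simp

-- A's second loop is a map over the enumerated string.
lemma pvFold2 (m : Int) (xs : List (Int × Char)) :
    xs.foldl (fun acc p =>
      if p.1 ≥ m then acc ++ [Char.ofNat (p.2.toNat - 1)] else acc ++ [p.2]) []
    = xs.map (fun p => if p.1 ≥ m then Char.ofNat (p.2.toNat - 1) else p.2) := by
  have h : (fun (acc : List Char) (p : Int × Char) =>
      if p.1 ≥ m then acc ++ [Char.ofNat (p.2.toNat - 1)] else acc ++ [p.2])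
      = fun acc p => acc ++ [if p.1 ≥ m then Char.ofNat (p.2.toNat - 1) else p.2] := by
    funext acc p; split <;> rfl
  rw [h, PySem.List.foldl_append_singleton_eq_map]; simp

-- What the tables contain, verified by computation over the full ASCII range.
def pvTablesOK : Bool :=
  (List.range 127).all (fun j =>
    let c := Char.ofNat (j + 1)
    let t := if PySem.Chars.isalpha c then Char.ofNat (c.toNat + 3) else c
    pvTables.1.getD c c == t && pvTables.2.getD c c == Char.ofNat (t.toNat - 1))

set_option maxRecDepth 100000 in
lemma pvTablesOK_eq : pvTablesOK = true := by decide

-- Per-character meaning of the two table lookups, for every char the domain admits.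
lemma pvLook (c : Char) (h1 : 1 ≤ c.toNat) (h2 : c.toNat ≤ 127) :
    pvTables.1.getD c c = (if PySem.Chars.isalpha c then Char.ofNat (c.toNat + 3) else c) ∧
    pvTables.2.getD c c
      = Char.ofNat ((if PySem.Chars.isalpha c then Char.ofNat (c.toNat + 3) else c).toNat - 1) := by
  have h := pvTablesOK_eq
  unfold pvTablesOK at h
  rw [List.all_eq_true] at h
  have hm : c.toNat - 1 ∈ List.range 127 := by
    rw [List.mem_range]; omega
  have hj := h _ hm
  have hc : Char.ofNat (c.toNat - 1 + 1) = c := by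
    rw [show c.toNat - 1 + 1 = c.toNat by omega, Char.ofNat_toNat]
  simp only [hc, Bool.and_eq_true, beq_iff_eq] at hj
  exact hj

-- ===== VERDICT (by name: the statement is the Claim_ definition above) =====
theorem criptografia_spec : Claim_equal_criptografia := by
  intro text hdom
  unfold Spec_criptografia criptografia criptografia_alt
  rw [pvFold1]
  dsimp only
  rw [pvFold2]
  apply congrArg String.ofList
  set s := text.toList with hs
  have hallc : ∀ c ∈ s, pvDomChar c = true := by
    intro c hcmem
    exact List.all_eq_true.mp hdom c hcmem
  set g : Char → Char := fun c => if PySem.Chars.isalpha c then Char.ofNat (c.toNat + 3) else c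
    with hg
  -- normalise B's slice bounds to Nat drop/take
  have hfd : PySem.Int.floordiv ((s.length : Int)) 2 = ((s.length / 2 : Nat) : Int) := by
    rw [PySem.Int.floordiv_eq_ediv_of_pos (by omega)]; omega
  have hk : ((s.length : Int) - PySem.Int.floordiv ((s.length : Int)) 2)
      = ((s.length - s.length / 2 : Nat) : Int) := by
    rw [hfd]; omega
  rw [hk, PySem.List.slice_from_natCast, PySem.List.slice_to_natCast]
  set kN := s.length - s.length / 2 with hkN
  apply List.ext_getElem
  · simp
    omega
  · intro i hi1 hi2
    have hiN : i < s.length := by simpa using hi1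
    have hsrc : s.length - 1 - i < s.length := by omega
    have hdc := hallc (s[s.length - 1 - i]'hsrc) (List.getElem_mem _)
    have hrange : 1 ≤ (s[s.length - 1 - i]'hsrc).toNat ∧ (s[s.length - 1 - i]'hsrc).toNat ≤ 127 := by
      simp only [pvDomChar, Bool.or_eq_true, Bool.and_eq_true, decide_eq_true_eq,
        beq_iff_eq] at hdc
      omega
    have hlook := pvLook _ hrange.1 hrange.2
    simp only [List.getElem_map, PySem.List.getElem_enumerate, List.getElem_append,
      List.getElem_reverse, List.length_reverse, List.length_map, List.length_drop,
      List.length_take, List.getElem_take, List.getElem_drop]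
    have hcond : ((0 : Int) + i ≥ PySem.Int.floordiv ((s.length : Int)) 2)
        ↔ (s.length / 2 ≤ i) := by
      rw [hfd]; omega
    by_cases hcase : s.length / 2 ≤ i
    · -- decremented output half ↔ front table on the first kN source chars
      rw [if_pos (hcond.mpr hcase), dif_neg (by omega)]
      have e2 : min kN s.length - 1 - (i - (s.length - kN)) = s.length - 1 - i := by omega
      simp only [e2]
      rw [hlook.2]
    · -- untouched output half ↔ back table on the last n/2 source chars
      rw [if_neg (fun h => hcase (hcond.mp h)), dif_pos (by omega)]
      have e2 : kN + (s.length - kN - 1 - i) = s.length - 1 - i := by omega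
      simp only [e2]
      rw [hlook.1]
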